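-- pv_equiv track=rewrite | github.com/Kim-yongbeom/Algorithm | 프로그래머스/1단계/폰켓몬.py | solution
-- ===== SOURCE A (Python) =====
-- from itertools import combinations
--
-- def solution(nums):
--     answer = 0
--     tmp = 0
--     num = set(nums)
--     if len(num) >= len(nums)//2:
--         for i in combinations(num, len(nums)//2):
--             score = len(set(i))
--             if score == len(nums)//2:
--                 answer = score
--                 break
--             elif score > tmp:
--                 answer = score
--                 tmp = score
--     else:
--         for i in combinations(num, len(num)):
--             score = len(set(i))
--             if score == len(nums)//2:
--                 answer = score
--                 break
--             elif score > tmp: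
--                 answer = score
--                 tmp = score
--     return answer
-- ===== SOURCE B (Python) =====
-- def solution(nums):
--     # closed form: you can take at most len(nums)//2 Pokemon, and at most
--     # one of each distinct kind, so the best distinct count is the minimum.
--     return min(len(set(nums)), len(nums) // 2)
-- ===== Notes on version B (the rewrite author's own statement) =====
-- stated objective: simpler
-- what changed: Replaces the combinations-based search over subsets (which always terminates on its first combination) by the closed form min(len(set(nums)), len(nums)//2).
import Mathlib
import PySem

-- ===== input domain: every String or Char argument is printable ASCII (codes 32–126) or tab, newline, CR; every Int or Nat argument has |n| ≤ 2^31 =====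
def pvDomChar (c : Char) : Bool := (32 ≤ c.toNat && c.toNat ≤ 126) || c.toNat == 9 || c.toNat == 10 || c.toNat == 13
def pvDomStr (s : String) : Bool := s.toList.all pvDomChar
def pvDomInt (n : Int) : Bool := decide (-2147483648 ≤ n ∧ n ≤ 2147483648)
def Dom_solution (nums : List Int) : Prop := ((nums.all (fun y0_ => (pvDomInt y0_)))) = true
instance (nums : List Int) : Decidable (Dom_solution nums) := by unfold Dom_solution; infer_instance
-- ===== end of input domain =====

-- B replaces A's combinations-based search with the closed form
-- min(len(set(nums)), len(nums)//2): simpler, same result.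

-- ===== PORT A =====
-- the 'for i in combinations(...)' loop with its break; state = (answer, tmp)
-- (the loop's result does not depend on the iteration order of the set 'num')
def solutionLoop (k : Int) : List (List Int) → Int → Int → Int
  | [], answer, _ => answer
  | i :: rest, answer, tmp =>
    let score : Int := ((PySem.Set.ofList i).length : Int)
    if score = k then score
    else if tmp < score then solutionLoop k rest score score
    else solutionLoop k rest answer tmp

def solution (nums : List Int) : Int :=
  let num : PySem.Set Int := PySem.Set.ofList nums
  let k : Int := PySem.Int.floordiv (nums.length : Int) 2
  if (num.length : Int) ≥ k then
    solutionLoop k (PySem.List.combinations num k.toNat) 0 0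
  else
    solutionLoop k (PySem.List.combinations num num.length) 0 0

-- ===== PORT B =====
def solution_alt (nums : List Int) : Int :=
  min ((PySem.Set.ofList nums).length : Int) (PySem.Int.floordiv (nums.length : Int) 2)

-- ===== PRECONDITION & SPEC =====
def Spec_solution (nums : List Int) (out : Int) : Prop := out = solution_alt nums
instance (nums : List Int) (out : Int) : Decidable (Spec_solution nums out) := by unfold Spec_solution; infer_instance

-- ===== CLAIM (what is proved, stated in full; the proofs are below) =====
def Claim_equal_solution : Prop := ∀ (nums : List Int), Dom_solution nums → Spec_solution nums (solution nums)

-- ===== LEMMAS AND PROOFS =====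

theorem combinations_ne_nil {α : Type} (xs : List α) (r : Nat) (h : r ≤ xs.length) :
    PySem.List.combinations xs r ≠ [] := by
  induction xs generalizing r with
  | nil =>
    cases r with
    | zero => simp [PySem.List.combinations_zero]
    | succ r => simp at h
  | cons x t ih =>
    cases r with
    | zero => simp [PySem.List.combinations_zero]
    | succ r =>
      rw [PySem.List.combinations_cons_succ]
      have : PySem.List.combinations t r ≠ [] := ih r (by simpa using h)
      intro hcontra
      rcases List.append_eq_nil_iff.mp hcontra with ⟨h1, _⟩
      exact this (List.map_eq_nil_iff.mp h1)

-- length of the Python set of a duplicate-free list is its length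
theorem length_ofList_of_nodup {α : Type} [BEq α] [LawfulBEq α] (xs : List α)
    (h : xs.Nodup) : (PySem.Set.ofList xs).length = xs.length := by
  rw [PySem.Set.ofList_eq_self_of_nodup xs h]

-- if the list of combinations is nonempty and its first element has score = k, the loop returns k
theorem solutionLoop_head (k : Int) (c : List Int) (rest : List (List Int)) (a t : Int)
    (hscore : ((PySem.Set.ofList c).length : Int) = k) :
    solutionLoop k (c :: rest) a t = k := by
  simp [solutionLoop, hscore]

theorem solution_eq_min (nums : List Int) :
    solution nums = min ((PySem.Set.ofList nums).length : Int)
      (PySem.Int.floordiv (nums.length : Int) 2) := by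
  unfold solution
  set num : PySem.Set Int := PySem.Set.ofList nums with hnum
  have hnodup : num.Nodup := PySem.Set.nodup_ofList nums
  have hk : PySem.Int.floordiv (nums.length : Int) 2 = ((nums.length / 2 : Nat) : Int) := by
    exact_mod_cast PySem.Int.floordiv_natCast nums.length 2
  set r : Nat := nums.length / 2 with hr
  rw [hk]
  by_cases hge : ((num.length : Int) ≥ (r : Int))
  · -- first branch: the very first combination of size r has score r and breaks
    have hrle : r ≤ num.length := by exact_mod_cast hge
    have htoNat : ((r : Int)).toNat = r := Int.toNat_natCast r
    rw [if_pos hge, htoNat]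
    obtain ⟨c, rest, hcr⟩ :=
      List.exists_cons_of_ne_nil (combinations_ne_nil num r hrle)
    have hc : c ∈ PySem.List.combinations num r := by rw [hcr]; exact List.mem_cons_self
    obtain ⟨hsub, hlen⟩ := (PySem.List.mem_combinations_iff num r c).mp hc
    have hcnodup : c.Nodup := hsub.nodup hnodup
    have hscore : ((PySem.Set.ofList c).length : Int) = (r : Int) := by
      rw [length_ofList_of_nodup c hcnodup, hlen]
    rw [hcr, solutionLoop_head _ _ _ _ _ hscore]
    omega
  · -- second branch: the single combination of size num.length has score num.length < r
    have hlt : (num.length : Int) < (r : Int) := by omega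
    rw [if_neg hge, PySem.List.combinations_length_self num]
    have hscore : ((PySem.Set.ofList num).length : Int) = (num.length : Int) := by
      rw [length_ofList_of_nodup num hnodup]
    -- num ≠ [], hence 0 < num.length
    have hpos : 0 < num.length := by
      clear_value num r
      rcases nums with _ | ⟨x, t⟩
      · subst hnum hr; simp at hlt
      · have hx : x ∈ num := by
          rw [hnum]; exact (PySem.Set.mem_ofList _ _).mpr List.mem_cons_self
        exact List.length_pos_of_mem hx
    simp only [solutionLoop, hscore]
    rw [if_neg (by omega), if_pos (by exact_mod_cast hpos)]
    simp
    omega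

-- ===== VERDICT (by name: the statement is the Claim_ definition above) =====
theorem solution_spec : Claim_equal_solution := by
  intro nums _
  unfold Spec_solution solution_alt
  exact solution_eq_min nums
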